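-- pv_equiv track=rewrite | github.com/kretatusha/practices_number_2 | prefix_search.py | dict_find
-- ===== SOURCE A (Python) =====
-- from typing import List, Tuple
--
-- def dict_find(word_list: List[str]) -> Tuple[int, Tuple[str, str]]:
--     """Dictionary finding solution"""
--     prefix = dict()
--     best = 0
--     best_pair = None
--     for word in word_list:
--         for l in range(1, len(word) + 1):
--             if word[:l] not in prefix:
--                 prefix[word[:l]] = {word:''}
--             else:
--                 prefix[word[:l]][word] = ''
--
--     for word in word_list:
--         for l in range(len(word), 0, -1):
--             suf = word[-l:]
--             if suf in prefix:
--                 for second_word in prefix[suf]: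
--                     if second_word != word:
--                         if l > best:
--                             best = l
--                             best_pair = (word, second_word)
--     return best, best_pair
-- ===== SOURCE B (Python) =====
-- from typing import List, Tuple
--
-- def dict_find(word_list: List[str]) -> Tuple[int, Tuple[str, str]]:
--     """Keep only the first two distinct words per prefix and stop the
--     per-word suffix scan at the first (longest) hit."""
--     first_two = {}
--     for word in word_list:
--         for l in range(1, len(word) + 1):
--             p = word[:l]
--             entry = first_two.get(p)
--             if entry is None:
--                 first_two[p] = (word, None)
--             elif entry[1] is None and entry[0] != word:
--                 first_two[p] = (entry[0], word)
--
--     best = 0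
--     best_pair = None
--     for word in word_list:
--         for l in range(len(word), 0, -1):
--             entry = first_two.get(word[-l:])
--             if entry is None:
--                 continue
--             other = entry[0] if entry[0] != word else entry[1]
--             if other is not None:
--                 if l > best:
--                     best = l
--                     best_pair = (word, other)
--                 break
--     return best, best_pair
-- ===== Notes on version B (the rewrite author's own statement) =====
-- stated objective: faster
-- what changed: B's prefix index stores only the first two distinct words per prefix (instead of a dict of all words sharing it) and the per-word descending suffix scan breaks at the first hit instead of rescanning every shorter suffix and every word sharing it.
import Mathlib
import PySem

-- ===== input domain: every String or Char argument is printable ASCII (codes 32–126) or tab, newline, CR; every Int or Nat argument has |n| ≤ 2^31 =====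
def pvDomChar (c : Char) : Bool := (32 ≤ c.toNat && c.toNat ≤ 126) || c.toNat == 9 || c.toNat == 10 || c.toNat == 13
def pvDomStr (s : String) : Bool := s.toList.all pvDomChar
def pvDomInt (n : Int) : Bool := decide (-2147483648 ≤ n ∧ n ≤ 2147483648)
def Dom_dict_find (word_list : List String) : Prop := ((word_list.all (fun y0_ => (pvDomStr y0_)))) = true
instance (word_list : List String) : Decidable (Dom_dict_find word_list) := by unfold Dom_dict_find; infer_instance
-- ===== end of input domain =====

-- B keeps only the first two distinct words per prefix and stops each suffix scan
-- at the first (longest) hit, instead of A's full word-set per prefix and full rescans.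

-- ===== PORT A =====
-- inner body of A's first loop: prefix[word[:l]] gains word (new singleton dict or in-place insert)
def pvInsertA (word : String) (pr : PySem.Dict String (PySem.Dict String String)) (l : Int) :
    PySem.Dict String (PySem.Dict String String) :=
  if pr.contains (PySem.Str.slice word none (some l)) = false then
    pr.insert (PySem.Str.slice word none (some l)) (PySem.Dict.empty.insert word "")
  else
    pr.insert (PySem.Str.slice word none (some l))
      ((pr.getD (PySem.Str.slice word none (some l)) PySem.Dict.empty).insert word "")

-- inner body of A's second loop (one value of l): iterate the inner dict's keys
def pvScanA (pr : PySem.Dict String (PySem.Dict String String)) (word : String)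
    (st : Int × (Option (String × String))) (l : Int) : Int × (Option (String × String)) :=
  if pr.contains (PySem.Str.slice word (some (-l)) none) then
    (pr.getD (PySem.Str.slice word (some (-l)) none) PySem.Dict.empty).keys.foldl
      (fun st second =>
        if second ≠ word then (if l > st.1 then (l, some (word, second)) else st) else st) st
  else st

def dict_find (word_list : List String) : Int × (Option (String × String)) :=
  let pref :=
    word_list.foldl
      (fun pr word => (PySem.List.pyRange 1 (PySem.Str.len word + 1) 1).foldl (pvInsertA word) pr)
      PySem.Dict.empty
  word_list.foldl
    (fun st word => (PySem.List.pyRange (PySem.Str.len word) 0 (-1)).foldl (pvScanA pref word) st)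
    ((0 : Int), (none : Option (String × String)))

-- ===== PORT B =====
-- inner body of B's first loop: remember only the first two distinct words per prefix
def pvInsertB (word : String) (d : PySem.Dict String (String × Option String)) (l : Int) :
    PySem.Dict String (String × Option String) :=
  match d.get? (PySem.Str.slice word none (some l)) with
  | none => d.insert (PySem.Str.slice word none (some l)) (word, none)
  | some (f, none) =>
    if f ≠ word then d.insert (PySem.Str.slice word none (some l)) (f, some word) else d
  | some (_, some _) => d

-- B's per-word descending scan with break at the first hit
def pvSearchB (d : PySem.Dict String (String × Option String)) (word : String) :
    List Int → Int × (Option (String × String)) → Int × (Option (String × String))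
  | [], st => st
  | l :: ls, st =>
    match d.get? (PySem.Str.slice word (some (-l)) none) with
    | none => pvSearchB d word ls st
    | some (f, s?) =>
      match (if f ≠ word then some f else s?) with
      | none => pvSearchB d word ls st
      | some o => if l > st.1 then (l, some (word, o)) else st

def dict_find_alt (word_list : List String) : Int × (Option (String × String)) :=
  let first_two :=
    word_list.foldl
      (fun d word => (PySem.List.pyRange 1 (PySem.Str.len word + 1) 1).foldl (pvInsertB word) d)
      PySem.Dict.empty
  word_list.foldl
    (fun st word => pvSearchB first_two word (PySem.List.pyRange (PySem.Str.len word) 0 (-1)) st)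
    ((0 : Int), (none : Option (String × String)))

-- ===== PRECONDITION & SPEC =====
def Spec_dict_find (word_list : List String) (out : Int × (Option (String × String))) : Prop := out = dict_find_alt word_list
instance (word_list : List String) (out : Int × (Option (String × String))) : Decidable (Spec_dict_find word_list out) := by unfold Spec_dict_find; infer_instance

-- ===== CLAIM (what is proved, stated in full; the proofs are below) =====
def Claim_equal_dict_find : Prop := ∀ (word_list : List String), Dom_dict_find word_list → Spec_dict_find word_list (dict_find word_list)

-- ===== LEMMAS AND PROOFS =====

-- B's dict entry is the first two distinct keys of A's inner dict
def pvProj : Option (PySem.Dict String String) → Option (String × Option String)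
  | none => none
  | some inner =>
    match inner.keys with
    | [] => none
    | f :: rest => some (f, rest.head?)

def pvInv (dA : PySem.Dict String (PySem.Dict String String))
    (dB : PySem.Dict String (String × Option String)) : Prop :=
  (∀ p, dB.get? p = pvProj (dA.get? p)) ∧
  (∀ p inner, dA.get? p = some inner → inner.keys.Nodup)

lemma pvInv_insert_both (dA : PySem.Dict String (PySem.Dict String String))
    (dB : PySem.Dict String (String × Option String)) (h : pvInv dA dB) (k : String)
    (iNew : PySem.Dict String String) (e : String × Option String)
    (hproj : pvProj (some iNew) = some e) (hnod : iNew.keys.Nodup) :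
    pvInv (dA.insert k iNew) (dB.insert k e) := by
  constructor
  · intro p
    rw [PySem.Dict.get?_insert, PySem.Dict.get?_insert]
    by_cases hp : p = k
    · simp [hp, hproj]
    · simp [hp, h.1 p]
  · intro p inner' h'
    rw [PySem.Dict.get?_insert] at h'
    by_cases hp : p = k
    · rw [if_pos hp] at h'
      cases h'
      exact hnod
    · rw [if_neg hp] at h'
      exact h.2 p inner' h'

lemma pvInv_insert_left (dA : PySem.Dict String (PySem.Dict String String))
    (dB : PySem.Dict String (String × Option String)) (h : pvInv dA dB) (k : String)
    (iNew : PySem.Dict String String)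
    (hproj : pvProj (some iNew) = dB.get? k) (hnod : iNew.keys.Nodup) :
    pvInv (dA.insert k iNew) dB := by
  constructor
  · intro p
    rw [PySem.Dict.get?_insert]
    by_cases hp : p = k
    · simp [hp, hproj.symm]
    · simp [hp, h.1 p]
  · intro p inner' h'
    rw [PySem.Dict.get?_insert] at h'
    by_cases hp : p = k
    · rw [if_pos hp] at h'
      cases h'
      exact hnod
    · rw [if_neg hp] at h'
      exact h.2 p inner' h'

lemma pvInv_step (w : String) (l : Int) (dA : PySem.Dict String (PySem.Dict String String))
    (dB : PySem.Dict String (String × Option String)) (h : pvInv dA dB) :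
    pvInv (pvInsertA w dA l) (pvInsertB w dB l) := by
  unfold pvInsertA pvInsertB
  rw [h.1]
  rcases hA : dA.get? (PySem.Str.slice w none (some l)) with _ | inner
  · have hc : dA.contains (PySem.Str.slice w none (some l)) = false := by
      rw [PySem.Dict.contains_eq_isSome_get?, hA]; rfl
    rw [hc, if_pos rfl]
    simp only [pvProj]
    exact pvInv_insert_both dA dB h _ _ _ rfl
      (PySem.Dict.nodup_keys_insert _ _ _ PySem.Dict.nodup_keys_empty)
  · have hc : dA.contains (PySem.Str.slice w none (some l)) = true := by
      rw [PySem.Dict.contains_eq_isSome_get?, hA]; rfl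
    rw [hc, if_neg (by simp), PySem.Dict.getD_of_get?_eq_some _ _ hA]
    have hndi : inner.keys.Nodup := h.2 _ _ hA
    have hnd' : (inner.insert w "").keys.Nodup := PySem.Dict.nodup_keys_insert _ _ _ hndi
    simp only [pvProj]
    rcases hks : inner.keys with _ | ⟨f, rest⟩
    · have hcw : inner.contains w = false := by
        rcases hcwb : inner.contains w
        · rfl
        · exfalso
          have := (PySem.Dict.contains_iff_mem_keys inner w).mp hcwb
          rw [hks] at this; simp at this
      have hkn : (inner.insert w "").keys = [w] := by
        rw [PySem.Dict.keys_insert_of_not_contains _ _ hcw, hks]; rfl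
      exact pvInv_insert_both dA dB h _ _ _ (by simp [pvProj, hkn]) hnd'
    · rcases rest with _ | ⟨s, rest'⟩
      · simp only [List.head?_nil]
        by_cases hf : f = w
        · rw [if_neg (by simp [hf])]
          have hcw : inner.contains w = true :=
            (PySem.Dict.contains_iff_mem_keys inner w).mpr (by rw [hks, hf]; simp)
          have hkn : (inner.insert w "").keys = [f] := by
            rw [PySem.Dict.keys_insert_of_contains _ _ hcw, hks]
          exact pvInv_insert_left dA dB h _ _
            (by rw [h.1, hA]; simp [pvProj, hkn, hks]) hnd'
        · rw [if_pos hf]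
          have hcw : inner.contains w = false := by
            rcases hcwb : inner.contains w
            · rfl
            · exfalso
              have := (PySem.Dict.contains_iff_mem_keys inner w).mp hcwb
              rw [hks] at this; simp at this
              exact hf this.symm
          have hkn : (inner.insert w "").keys = [f, w] := by
            rw [PySem.Dict.keys_insert_of_not_contains _ _ hcw, hks]; rfl
          exact pvInv_insert_both dA dB h _ _ _ (by simp [pvProj, hkn]) hnd'
      · simp only [List.head?_cons]
        rcases hcwb : inner.contains w
        · have hkn : (inner.insert w "").keys = f :: s :: rest' ++ [w] := by
            rw [PySem.Dict.keys_insert_of_not_contains _ _ hcwb, hks]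
          exact pvInv_insert_left dA dB h _ _
            (by rw [h.1, hA]; simp [pvProj, hkn, hks]) hnd'
        · have hkn : (inner.insert w "").keys = f :: s :: rest' := by
            rw [PySem.Dict.keys_insert_of_contains _ _ hcwb, hks]
          exact pvInv_insert_left dA dB h _ _
            (by rw [h.1, hA]; simp [pvProj, hkn, hks]) hnd'

lemma pvInv_fold (w : String) (ls : List Int) (dA : PySem.Dict String (PySem.Dict String String))
    (dB : PySem.Dict String (String × Option String)) (h : pvInv dA dB) :
    pvInv (ls.foldl (pvInsertA w) dA) (ls.foldl (pvInsertB w) dB) := by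
  induction ls generalizing dA dB with
  | nil => exact h
  | cons l ls ih => exact ih _ _ (pvInv_step w l dA dB h)

lemma pvInv_build (ws : List String) (dA : PySem.Dict String (PySem.Dict String String))
    (dB : PySem.Dict String (String × Option String)) (h : pvInv dA dB) :
    pvInv (ws.foldl (fun pr word => (PySem.List.pyRange 1 (PySem.Str.len word + 1) 1).foldl (pvInsertA word) pr) dA)
          (ws.foldl (fun d word => (PySem.List.pyRange 1 (PySem.Str.len word + 1) 1).foldl (pvInsertB word) d) dB) := by
  induction ws generalizing dA dB with
  | nil => exact h
  | cons w ws ih => exact ih _ _ (pvInv_fold w _ dA dB h)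

-- the first key distinct from w
def pvFirstNe (w : String) : List String → Option String
  | [] => none
  | f :: rest => if f ≠ w then some f else pvFirstNe w rest

lemma pvInner_noop (w : String) (l : Int) (ks : List String)
    (st : Int × (Option (String × String))) (hle : l ≤ st.1) :
    ks.foldl (fun st second =>
        if second ≠ w then (if l > st.1 then (l, some (w, second)) else st) else st) st = st := by
  induction ks with
  | nil => rfl
  | cons k ks ih =>
    have hstep : (if k ≠ w then (if l > st.1 then (l, some (w, k)) else st) else st) = st := by
      split_ifs with _ h2
      · exact absurd h2 (by omega)
      · rfl
      · rfl
    rw [List.foldl_cons]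
    show List.foldl _ (if k ≠ w then (if l > st.1 then (l, some (w, k)) else st) else st) ks = st
    rw [hstep]
    exact ih

lemma pvInner_char (w : String) (l : Int) (ks : List String)
    (st : Int × (Option (String × String))) :
    ks.foldl (fun st second =>
        if second ≠ w then (if l > st.1 then (l, some (w, second)) else st) else st) st =
      match pvFirstNe w ks with
      | none => st
      | some o => if l > st.1 then (l, some (w, o)) else st := by
  induction ks with
  | nil => rfl
  | cons k ks ih =>
    rw [List.foldl_cons]
    by_cases hk : k = w
    · simp only [hk, ne_eq, not_true_eq_false, if_false]
      rw [pvFirstNe]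
      simp only [ne_eq, not_true_eq_false, if_false]
      simpa using ih
    · rw [pvFirstNe]
      simp only [ne_eq, hk, not_false_eq_true, if_true]
      by_cases hgt : l > st.1
      · simp only [hgt, if_true]
        exact pvInner_noop w l ks (l, some (w, k)) (le_refl l)
      · simp only [hgt, if_false]
        exact pvInner_noop w l ks st (by omega)

lemma pvFirstNe_proj (w f : String) (rest : List String) (hnd : (f :: rest).Nodup) :
    pvFirstNe w (f :: rest) = if f ≠ w then some f else rest.head? := by
  rw [pvFirstNe]
  by_cases hf : f = w
  · simp only [hf, ne_eq, not_true_eq_false, if_false]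
    rcases rest with _ | ⟨s, rest'⟩
    · rfl
    · have hs : s ≠ w := by
        have hw : f ∉ s :: rest' := (List.nodup_cons.mp hnd).1
        subst hf
        intro h; exact hw (by simp [h])
      rw [pvFirstNe]
      simp [hs]
  · simp [hf]

lemma pvScan_noop (pr : PySem.Dict String (PySem.Dict String String)) (w : String)
    (ls : List Int) (st : Int × (Option (String × String))) (hle : ∀ l ∈ ls, l ≤ st.1) :
    ls.foldl (pvScanA pr w) st = st := by
  induction ls with
  | nil => rfl
  | cons l ls ih =>
    rw [List.foldl_cons]
    have hstep : pvScanA pr w st l = st := by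
      unfold pvScanA
      split_ifs
      · exact pvInner_noop w l _ st (hle l (by simp))
      · rfl
    rw [hstep]
    exact ih (fun l' hl' => hle l' (by simp [hl']))

lemma pvScan_eq_search (pr : PySem.Dict String (PySem.Dict String String))
    (dB : PySem.Dict String (String × Option String)) (h : pvInv pr dB) (w : String)
    (ls : List Int) (hp : ls.Pairwise (· > ·)) (st : Int × (Option (String × String))) :
    ls.foldl (pvScanA pr w) st = pvSearchB dB w ls st := by
  obtain ⟨h1, h2⟩ := h
  revert hp
  induction ls generalizing st with
  | nil => intro _; rfl
  | cons l ls ih =>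
    intro hp
    have hlt : ∀ x ∈ ls, x < l := fun x hx => (List.pairwise_cons.mp hp).1 x hx
    have hp' : ls.Pairwise (· > ·) := (List.pairwise_cons.mp hp).2
    rw [List.foldl_cons, pvSearchB, h1]
    rcases hA : pr.get? (PySem.Str.slice w (some (-l)) none) with _ | inner
    · have hc : pr.contains (PySem.Str.slice w (some (-l)) none) = false := by
        rw [PySem.Dict.contains_eq_isSome_get?, hA]; rfl
      have hstep : pvScanA pr w st l = st := by
        unfold pvScanA; rw [hc]; rfl
      rw [hstep]
      simpa [pvProj] using ih st hp'
    · have hc : pr.contains (PySem.Str.slice w (some (-l)) none) = true := by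
        rw [PySem.Dict.contains_eq_isSome_get?, hA]; rfl
      have hgetD : pr.getD (PySem.Str.slice w (some (-l)) none) PySem.Dict.empty = inner :=
        PySem.Dict.getD_of_get?_eq_some _ _ hA
      have hstep : pvScanA pr w st l =
          inner.keys.foldl (fun st second =>
            if second ≠ w then (if l > st.1 then (l, some (w, second)) else st) else st) st := by
        unfold pvScanA; rw [hc, hgetD]; rfl
      rw [hstep]
      rcases hks : inner.keys with _ | ⟨f, rest⟩
      · simpa [pvProj, hks] using ih st hp'
      · have hnd : (f :: rest).Nodup := hks ▸ h2 _ _ hA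
        rw [pvInner_char, pvFirstNe_proj w f rest hnd]
        simp only [pvProj, hks]
        rcases ho : (if f ≠ w then some f else rest.head?) with _ | o
        · exact ih st hp'
        · by_cases hgt : l > st.1
          · simp only [hgt, if_true]
            exact pvScan_noop pr w ls (l, some (w, o)) (fun x hx => le_of_lt (hlt x hx))
          · simp only [hgt, if_false]
            exact pvScan_noop pr w ls st (fun x hx => by have := hlt x hx; omega)

lemma pvRange_pairwise (n : Int) : (PySem.List.pyRange n 0 (-1)).Pairwise (· > ·) := by
  rw [PySem.List.pyRange_neg_one]
  rw [List.pairwise_map]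
  exact (List.pairwise_lt_range).imp (by intro a b h; simp; omega)

-- ===== VERDICT (by name: the statement is the Claim_ definition above) =====
theorem dict_find_spec : Claim_equal_dict_find := by
  intro ws _
  unfold Spec_dict_find dict_find dict_find_alt
  have hinv : pvInv
      (ws.foldl (fun pr word => (PySem.List.pyRange 1 (PySem.Str.len word + 1) 1).foldl (pvInsertA word) pr) PySem.Dict.empty)
      (ws.foldl (fun d word => (PySem.List.pyRange 1 (PySem.Str.len word + 1) 1).foldl (pvInsertB word) d) PySem.Dict.empty) := by
    refine pvInv_build ws _ _ ⟨?_, ?_⟩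
    · intro p; simp [PySem.Dict.get?_empty, pvProj]
    · intro p inner hp; simp [PySem.Dict.get?_empty] at hp
  exact PySem.List.foldl_congr_mem ws _ _ _
    (fun st w _ => pvScan_eq_search _ _ hinv w _ (pvRange_pairwise _) st)
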